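-- pv_equiv track=rewrite | github.com/todotxt/todo.txt-cli | .todo.actions.d/weeklyreview.py | getGoalCompletions
-- ===== SOURCE A (Python) =====
-- def getGoalCompletions(goal_projects, project_completions):
--     goal_completions = {}
--     goals = goal_projects.keys()
--     for goal in goal_projects:
--         for project in project_completions:
--             if project in goal_projects[goal]:
--                 if goal not in goal_completions:
--                     goal_completions[goal] = project_completions[project]
--                 else:
--                     goal_completions[goal] = goal_completions[goal] + project_completions[project]
--     return goal_completions
-- ===== SOURCE B (Python) =====
-- def getGoalCompletions(goal_projects, project_completions):
--     # Inverted index: project -> set of goals that list it.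
--     index = {}
--     for goal, projects in goal_projects.items():
--         for project in projects:
--             index.setdefault(project, set()).add(goal)
--     # One pass over the completion counts, accumulating per goal.
--     sums = {}
--     for project, count in project_completions.items():
--         for goal in index.get(project, ()):
--             sums[goal] = sums.get(goal, 0) + count
--     # Emit in goal order, only goals that received a count.
--     return {goal: sums[goal] for goal in goal_projects if goal in sums}
-- ===== Notes on version B (the rewrite author's own statement) =====
-- stated objective: faster
-- what changed: B replaces A's nested goals-by-completions loops with repeated list-membership scans by building an inverted index (project -> set of goals) in one pass, then a single accumulating pass over project_completions, emitting results in goal order.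
import Mathlib
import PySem

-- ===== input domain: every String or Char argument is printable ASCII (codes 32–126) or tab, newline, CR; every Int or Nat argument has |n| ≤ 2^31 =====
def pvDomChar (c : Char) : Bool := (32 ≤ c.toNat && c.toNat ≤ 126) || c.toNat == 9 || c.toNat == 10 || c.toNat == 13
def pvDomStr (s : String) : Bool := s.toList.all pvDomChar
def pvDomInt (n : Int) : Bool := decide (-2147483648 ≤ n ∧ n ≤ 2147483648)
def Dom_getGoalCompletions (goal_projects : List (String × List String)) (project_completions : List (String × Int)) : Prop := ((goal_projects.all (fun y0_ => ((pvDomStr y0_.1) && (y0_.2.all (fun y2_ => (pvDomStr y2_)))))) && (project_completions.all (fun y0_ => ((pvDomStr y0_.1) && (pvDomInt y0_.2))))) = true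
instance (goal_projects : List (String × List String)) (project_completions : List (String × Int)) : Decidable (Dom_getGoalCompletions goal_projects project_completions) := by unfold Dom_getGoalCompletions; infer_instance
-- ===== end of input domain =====

-- B replaces A's goals×projects membership scanning by an inverted index (project → set of
-- goals) built in one pass, a single accumulating pass over the completions, and an emission
-- pass in goal order; return-value equivalence only (neither version mutates its arguments).

-- ===== PORT A =====
-- A receives two dicts; under the type convention they arrive as association lists and are
-- read with Python-dict semantics via PySem.Dict.ofList (first position, last value).
def getGoalCompletions (goal_projects : List (String × List String)) (project_completions : List (String × Int)) : List (String × Int) :=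
  let gp := PySem.Dict.ofList goal_projects
  let pc := PySem.Dict.ofList project_completions
  -- goal_completions = {}; (A's `goals = goal_projects.keys()` is never used)
  -- for goal in goal_projects: for project in project_completions: …
  let gc := gp.keys.foldl (fun gc goal =>
    pc.keys.foldl (fun gc project =>
      if project ∈ gp.getD goal [] then        -- `project in goal_projects[goal]` (key present)
        if gc.contains goal = false then
          gc.insert goal (pc.getD project 0)   -- goal_completions[goal] = project_completions[project]
        else
          gc.insert goal (gc.getD goal 0 + pc.getD project 0)
      else gc) gc) PySem.Dict.empty
  gc.items

-- ===== PORT B =====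
def getGoalCompletions_alt (goal_projects : List (String × List String)) (project_completions : List (String × Int)) : List (String × Int) :=
  let gp := PySem.Dict.ofList goal_projects
  let pc := PySem.Dict.ofList project_completions
  -- index = {}; for goal, projects in …: for project in projects: index.setdefault(project, set()).add(goal)
  let index : PySem.Dict String (PySem.Set String) := gp.items.foldl (fun idx pr =>
    pr.2.foldl (fun idx project => idx.modify project [] (fun s => PySem.Set.add s pr.1)) idx)
    PySem.Dict.empty
  -- sums = {}; for project, count in …: for goal in index.get(project, ()): sums[goal] = sums.get(goal, 0) + count
  -- (iterating the goal set in its Lean order is sound: sums is only read back by key)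
  let sums : PySem.Dict String Int := pc.items.foldl (fun sums pr =>
    (index.getD pr.1 []).foldl (fun sums goal => sums.insert goal (sums.getD goal 0 + pr.2)) sums)
    PySem.Dict.empty
  -- {goal: sums[goal] for goal in goal_projects if goal in sums}
  (gp.keys.foldl (fun out goal =>
    match sums.get? goal with
    | some v => out.insert goal v
    | none => out) PySem.Dict.empty).items

-- ===== PRECONDITION & SPEC =====
def Spec_getGoalCompletions (goal_projects : List (String × List String)) (project_completions : List (String × Int)) (out : List (String × Int)) : Prop := out = getGoalCompletions_alt goal_projects project_completions
instance (goal_projects : List (String × List String)) (project_completions : List (String × Int)) (out : List (String × Int)) : Decidable (Spec_getGoalCompletions goal_projects project_completions out) := by unfold Spec_getGoalCompletions; infer_instance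

-- ===== CLAIM (what is proved, stated in full; the proofs are below) =====
def Claim_equal_getGoalCompletions : Prop := ∀ (goal_projects : List (String × List String)) (project_completions : List (String × Int)), Dom_getGoalCompletions goal_projects project_completions → Spec_getGoalCompletions goal_projects project_completions (getGoalCompletions goal_projects project_completions)

-- ===== LEMMAS AND PROOFS =====

def pvMatched (gp : PySem.Dict String (List String)) (pc : PySem.Dict String Int) (g : String) : Bool :=
  pc.keys.any (fun p => decide (p ∈ gp.getD g []))

def pvSum (gp : PySem.Dict String (List String)) (pc : PySem.Dict String Int) (g : String) : Int :=
  ((pc.keys.filter (fun p => decide (p ∈ gp.getD g []))).map (fun p => pc.getD p 0)).sum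

lemma A_inner (gp : PySem.Dict String (List String)) (pc : PySem.Dict String Int) (g : String)
    (ps : List String) (gc : PySem.Dict String Int) :
    ps.foldl (fun gc project =>
      if project ∈ gp.getD g [] then
        if gc.contains g = false then gc.insert g (pc.getD project 0)
        else gc.insert g (gc.getD g 0 + pc.getD project 0)
      else gc) gc
    = if ps.any (fun p => decide (p ∈ gp.getD g [])) then
        gc.insert g (gc.getD g 0 + ((ps.filter (fun p => decide (p ∈ gp.getD g []))).map (fun p => pc.getD p 0)).sum)
      else gc := by
  induction ps generalizing gc with
  | nil => simp
  | cons p ps ih =>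
    by_cases hp : p ∈ gp.getD g []
    · have hstep : (if p ∈ gp.getD g [] then
          if gc.contains g = false then gc.insert g (pc.getD p 0)
          else gc.insert g (gc.getD g 0 + pc.getD p 0)
        else gc) = gc.insert g (gc.getD g 0 + pc.getD p 0) := by
        rcases h : gc.contains g with _ | _
        · simp [hp, h, PySem.Dict.getD_of_not_contains]
        · simp [hp]
      simp only [List.foldl_cons, hstep, ih]
      by_cases hany : ps.any (fun p => decide (p ∈ gp.getD g [])) = true
      · simp [hany, hp, PySem.Dict.getD_insert_self, PySem.Dict.insert_insert_self, add_assoc]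
      · have : ps.filter (fun p => decide (p ∈ gp.getD g [])) = [] := by
          simpa [List.filter_eq_nil_iff] using (by simpa [List.any_eq_true] using hany)
        simp [hany, hp, this]
    · simp only [List.foldl_cons, if_neg hp, ih]
      simp [hp]

lemma A_outer (gp : PySem.Dict String (List String)) (pc : PySem.Dict String Int)
    (ks : List String) (gc : PySem.Dict String Int) (hnd : ks.Nodup)
    (hfresh : ∀ g ∈ ks, gc.contains g = false) :
    (ks.foldl (fun gc goal =>
      pc.keys.foldl (fun gc project =>
        if project ∈ gp.getD goal [] then
          if gc.contains goal = false then gc.insert goal (pc.getD project 0)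
          else gc.insert goal (gc.getD goal 0 + pc.getD project 0)
        else gc) gc) gc).items
    = gc.items ++ (ks.filter (pvMatched gp pc)).map (fun g => (g, pvSum gp pc g)) := by
  induction ks generalizing gc with
  | nil => simp
  | cons g ks ih =>
    have hg : gc.contains g = false := hfresh g (by simp)
    rw [List.foldl_cons, A_inner]
    by_cases hm : pvMatched gp pc g = true
    · have hgc0 : gc.getD g 0 = 0 := by simp [PySem.Dict.getD_of_not_contains, hg]
      rw [show (pc.keys.any fun p => decide (p ∈ gp.getD g [])) = true from hm, if_pos rfl]
      rw [ih _ hnd.of_cons ?_]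
      · simp [PySem.Dict.items_insert_of_not_contains, hg, hm, hgc0, pvSum]
      · intro g' hg'
        have hne : g' ≠ g := by rintro rfl; exact (List.nodup_cons.mp hnd).1 hg'
        simp [PySem.Dict.contains_insert, hne, hfresh g' (List.mem_cons_of_mem _ hg')]
    · have hm' : (pc.keys.any fun p => decide (p ∈ gp.getD g [])) = false := by
        simpa [pvMatched] using hm
      rw [hm', if_neg (by simp)]
      rw [ih _ hnd.of_cons (fun g' h => hfresh g' (List.mem_cons_of_mem _ h))]
      simp [hm]

lemma idx_inner_mem (g0 : String) (ps : List String) (idx : PySem.Dict String (PySem.Set String))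
    (p g : String) :
    (g ∈ (ps.foldl (fun idx project => idx.modify project [] (fun s => PySem.Set.add s g0)) idx).getD p [])
    ↔ g ∈ idx.getD p [] ∨ (g = g0 ∧ p ∈ ps) := by
  induction ps generalizing idx with
  | nil => simp
  | cons q ps ih =>
    rw [List.foldl_cons, ih]
    rw [PySem.Dict.getD_modify]
    by_cases hpq : p = q
    · subst hpq
      simp [PySem.Set.mem_add]
      tauto
    · simp [hpq]

lemma idx_outer_mem (items : List (String × List String)) (idx : PySem.Dict String (PySem.Set String))
    (p g : String) :
    (g ∈ (items.foldl (fun idx pr =>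
        pr.2.foldl (fun idx project => idx.modify project [] (fun s => PySem.Set.add s pr.1)) idx) idx).getD p [])
    ↔ g ∈ idx.getD p [] ∨ ∃ pr ∈ items, g = pr.1 ∧ p ∈ pr.2 := by
  induction items generalizing idx with
  | nil => simp
  | cons pr items ih =>
    rw [List.foldl_cons, ih, idx_inner_mem]
    simp
    tauto

lemma idx_inner_nodup (g0 : String) (ps : List String) (idx : PySem.Dict String (PySem.Set String))
    (h : ∀ q, (idx.getD q []).Nodup) :
    ∀ q, ((ps.foldl (fun idx project => idx.modify project [] (fun s => PySem.Set.add s g0)) idx).getD q []).Nodup := by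
  induction ps generalizing idx with
  | nil => exact h
  | cons r ps ih =>
    rw [List.foldl_cons]
    refine ih _ (fun q => ?_)
    rw [PySem.Dict.getD_modify]
    by_cases hqr : q = r
    · simpa [hqr] using PySem.Set.nodup_add _ g0 (h r)
    · simpa [hqr] using h q

lemma idx_outer_nodup (items : List (String × List String)) (idx : PySem.Dict String (PySem.Set String))
    (h : ∀ q, (idx.getD q []).Nodup) :
    ∀ q, ((items.foldl (fun idx pr =>
        pr.2.foldl (fun idx project => idx.modify project [] (fun s => PySem.Set.add s pr.1)) idx) idx).getD q []).Nodup := by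
  induction items generalizing idx with
  | nil => exact h
  | cons pr items ih =>
    rw [List.foldl_cons]
    exact ih _ (idx_inner_nodup pr.1 pr.2 idx h)

lemma setloop_getD (c : Int) (l : List String) (hl : l.Nodup) (d : PySem.Dict String Int) (g : String) :
    (l.foldl (fun d x => d.insert x (d.getD x 0 + c)) d).getD g 0
    = d.getD g 0 + (if g ∈ l then c else 0) := by
  induction l generalizing d with
  | nil => simp
  | cons x l ih =>
    rw [List.foldl_cons, ih hl.of_cons]
    by_cases hgx : g = x
    · subst hgx
      have : g ∉ l := (List.nodup_cons.mp hl).1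
      simp [this, PySem.Dict.getD_insert_self]
    · simp [PySem.Dict.getD_insert, hgx]

lemma setloop_contains (c : Int) (l : List String) (d : PySem.Dict String Int) (g : String) :
    (l.foldl (fun d x => d.insert x (d.getD x 0 + c)) d).contains g
    = (d.contains g || decide (g ∈ l)) := by
  induction l generalizing d with
  | nil => simp
  | cons x l ih =>
    rw [List.foldl_cons, ih]
    by_cases hgx : g = x
    · simp [hgx]
    · have hb : (g == x) = false := by simpa using hgx
      simp [hgx, PySem.Dict.contains_insert, hb]

lemma get?_eq_ite_contains (d : PySem.Dict String Int) (k : String) :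
    d.get? k = if d.contains k then some (d.getD k 0) else none := by
  rcases h : d.get? k with _ | v
  · rw [if_neg]
    rw [PySem.Dict.contains_eq_isSome_get?, h]
    simp
  · rw [if_pos]
    · simp [PySem.Dict.getD_eq_get?_getD, h]
    · rw [PySem.Dict.contains_eq_isSome_get?, h]
      rfl

lemma sums_getD (idx : PySem.Dict String (PySem.Set String)) (hidx : ∀ q, (idx.getD q []).Nodup)
    (prs : List (String × Int)) (s : PySem.Dict String Int) (g : String) :
    (prs.foldl (fun sums pr =>
      (idx.getD pr.1 []).foldl (fun sums goal => sums.insert goal (sums.getD goal 0 + pr.2)) sums) s).getD g 0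
    = s.getD g 0 + ((prs.filter (fun pr => decide (g ∈ idx.getD pr.1 []))).map (fun pr => pr.2)).sum := by
  induction prs generalizing s with
  | nil => simp
  | cons pr prs ih =>
    rw [List.foldl_cons, ih, setloop_getD pr.2 _ (hidx pr.1)]
    by_cases hm : g ∈ idx.getD pr.1 []
    · simp [hm]
      ring
    · simp [hm]

lemma sums_contains (idx : PySem.Dict String (PySem.Set String))
    (prs : List (String × Int)) (s : PySem.Dict String Int) (g : String) :
    (prs.foldl (fun sums pr =>
      (idx.getD pr.1 []).foldl (fun sums goal => sums.insert goal (sums.getD goal 0 + pr.2)) sums) s).contains g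
    = (s.contains g || prs.any (fun pr => decide (g ∈ idx.getD pr.1 []))) := by
  induction prs generalizing s with
  | nil => simp
  | cons pr prs ih =>
    rw [List.foldl_cons, ih, setloop_contains]
    simp [Bool.or_assoc]

lemma emit_items (sums : PySem.Dict String Int) (ks : List String) (out : PySem.Dict String Int)
    (hnd : ks.Nodup) (hfresh : ∀ g ∈ ks, out.contains g = false) :
    (ks.foldl (fun out goal =>
      match sums.get? goal with
      | some v => out.insert goal v
      | none => out) out).items
    = out.items ++ ks.filterMap (fun g => (sums.get? g).map (fun v => (g, v))) := by
  induction ks generalizing out with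
  | nil => simp
  | cons g ks ih =>
    rw [List.foldl_cons]
    rcases h : sums.get? g with _ | v
    · rw [ih _ hnd.of_cons (fun g' h' => hfresh g' (List.mem_cons_of_mem _ h'))]
      simp [h]
    · 
      rw [ih _ hnd.of_cons ?_]
      · rw [PySem.Dict.items_insert_of_not_contains]
        · simp [h]
        · exact hfresh g (by simp)
      · intro g' hg'
        have hne : g' ≠ g := by rintro rfl; exact (List.nodup_cons.mp hnd).1 hg'
        simp [PySem.Dict.contains_insert, hne, hfresh g' (List.mem_cons_of_mem _ hg')]

lemma filterMap_ite_eq_map_filter (l : List String) (p : String → Bool) (f : String → String × Int) :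
    l.filterMap (fun a => if p a then some (f a) else none) = (l.filter p).map f := by
  induction l with
  | nil => rfl
  | cons a l ih =>
    by_cases h : p a <;> simp [h, ih]

lemma B_items (gp : PySem.Dict String (List String)) (pc : PySem.Dict String Int)
    (hg : gp.keys.Nodup) (hp : pc.keys.Nodup) :
    (gp.keys.foldl (fun out goal =>
      match (pc.items.foldl (fun sums pr =>
          ((gp.items.foldl (fun idx pr =>
              pr.2.foldl (fun idx project => idx.modify project [] (fun s => PySem.Set.add s pr.1)) idx)
              PySem.Dict.empty).getD pr.1 []).foldl
            (fun sums goal => sums.insert goal (sums.getD goal 0 + pr.2)) sums)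
          PySem.Dict.empty).get? goal with
      | some v => out.insert goal v
      | none => out) PySem.Dict.empty).items
    = (gp.keys.filter (pvMatched gp pc)).map (fun g => (g, pvSum gp pc g)) := by
  set idx := gp.items.foldl (fun idx pr =>
      pr.2.foldl (fun idx project => idx.modify project [] (fun s => PySem.Set.add s pr.1)) idx)
      PySem.Dict.empty with hidxdef
  have hnodup : ∀ q, (idx.getD q []).Nodup := by
    rw [hidxdef]
    exact idx_outer_nodup _ _ (by simp)
  set sums := pc.items.foldl (fun sums pr =>
      (idx.getD pr.1 []).foldl (fun sums goal => sums.insert goal (sums.getD goal 0 + pr.2)) sums)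
      PySem.Dict.empty with hsumsdef
  rw [emit_items sums gp.keys _ hg (fun g _ => by simp)]
  have hget : ∀ g ∈ gp.keys, sums.get? g = if pvMatched gp pc g then some (pvSum gp pc g) else none := by
    intro g hgk
    have hbridge : ∀ p, (g ∈ idx.getD p []) ↔ p ∈ gp.getD g [] := by
      intro p
      rw [hidxdef, idx_outer_mem]
      simp only [PySem.Dict.getD_empty, List.not_mem_nil, false_or]
      constructor
      · rintro ⟨pr, hpr, rfl, hp2⟩
        have : gp.getD pr.1 [] = pr.2 := by
          have hmem : (pr.1, pr.2) ∈ gp.items := by simpa using hpr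
          exact PySem.Dict.getD_of_mem_items gp hmem hg []
        rw [this]; exact hp2
      · intro hpL
        have hne : gp.get? g ≠ none := by
          intro h0
          exact (PySem.Dict.get?_eq_none_iff_not_mem_keys gp g).mp h0 hgk
        rcases hv : gp.get? g with _ | v
        · exact absurd hv hne
        · refine ⟨(g, v), PySem.Dict.mem_items_of_get?_eq_some gp hv, rfl, ?_⟩
          have : gp.getD g [] = v := by simp [PySem.Dict.getD_eq_get?_getD, hv]
          rw [← this]; exact hpL
    rw [get?_eq_ite_contains, hsumsdef, sums_contains, sums_getD idx hnodup]
    simp only [PySem.Dict.contains_empty, PySem.Dict.getD_empty, Bool.false_or, zero_add]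
    rw [PySem.Dict.items_eq_map_keys pc hp 0, List.any_map, List.filter_map]
    simp only [pvMatched, pvSum]
    simp [hbridge, Function.comp_def]
  have hcong : gp.keys.filterMap (fun g => (sums.get? g).map (fun v => (g, v)))
      = gp.keys.filterMap (fun a => if pvMatched gp pc a then some (a, pvSum gp pc a) else none) :=
    List.filterMap_congr (fun a ha => by
      rw [hget a ha]; by_cases h : pvMatched gp pc a <;> simp [h])
  rw [hcong, filterMap_ite_eq_map_filter]
  rfl

lemma A_items (gp : PySem.Dict String (List String)) (pc : PySem.Dict String Int) (hg : gp.keys.Nodup) :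
    (gp.keys.foldl (fun gc goal =>
      pc.keys.foldl (fun gc project =>
        if project ∈ gp.getD goal [] then
          if gc.contains goal = false then gc.insert goal (pc.getD project 0)
          else gc.insert goal (gc.getD goal 0 + pc.getD project 0)
        else gc) gc) PySem.Dict.empty).items
    = (gp.keys.filter (pvMatched gp pc)).map (fun g => (g, pvSum gp pc g)) := by
  rw [A_outer gp pc gp.keys PySem.Dict.empty hg (fun g _ => by simp)]
  rfl

-- ===== VERDICT (by name: the statement is the Claim_ definition above) =====
theorem getGoalCompletions_spec : Claim_equal_getGoalCompletions := by
  intro gps pcs _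
  unfold Spec_getGoalCompletions
  simp only [getGoalCompletions, getGoalCompletions_alt]
  rw [A_items _ _ (PySem.Dict.nodup_keys_ofList _),
      B_items _ _ (PySem.Dict.nodup_keys_ofList _) (PySem.Dict.nodup_keys_ofList _)]
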